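-- pv_equiv track=rewrite | github.com/Building-With-Agents/watechcoalition | agents/ingestion/sources/scraper_adapter.py | _truncate_at_apply_section
-- ===== SOURCE A (Python) =====
-- _APPLY_STOP_PHRASES = (
--     "Apply now",
--     "Save job",
--     "Apply for this job",
--     "Submit application",
--     "Apply for job",
-- )
--
-- def _truncate_at_apply_section(text: str) -> str:
--     """Return text up to and including the first apply/save phrase (case-insensitive), trimmed.
--     If none found, return the original text. Used to avoid including the next job or unrelated content.
--     """
--     if not text or not text.strip():
--         return text
--     text_lower = text.lower()
--     best_start: int | None = None
--     best_end: int | None = None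
--     for phrase in _APPLY_STOP_PHRASES:
--         idx = text_lower.find(phrase.lower())
--         if idx != -1:
--             end = idx + len(phrase)
--             if best_start is None or idx < best_start:
--                 best_start = idx
--                 best_end = end
--     if best_end is not None:
--         return text[:best_end].strip()
--     return text
-- ===== SOURCE B (Python) =====
-- _APPLY_STOP_PHRASES = (
--     "Apply now",
--     "Save job",
--     "Apply for this job",
--     "Submit application",
--     "Apply for job",
-- )
--
-- def _truncate_at_apply_section(text: str) -> str:
--     """Single left-to-right scan: at each position try the phrases in order;
--     the first position with a match is the leftmost occurrence, and trying
--     phrases in tuple order reproduces A's tie-break."""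
--     if not text or not text.strip():
--         return text
--     text_lower = text.lower()
--     phrases = [p.lower() for p in _APPLY_STOP_PHRASES]
--     for i in range(len(text_lower)):
--         for p in phrases:
--             if text_lower.startswith(p, i):
--                 return text[:i + len(p)].strip()
--     return text
-- ===== Notes on version B (the rewrite author's own statement) =====
-- stated objective: alternative
-- what changed: Replaces five independent find() scans plus a min/tie-break fold with one left-to-right scan that tries the phrases in order at each position, so the first hit is directly the leftmost match.
import Mathlib
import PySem

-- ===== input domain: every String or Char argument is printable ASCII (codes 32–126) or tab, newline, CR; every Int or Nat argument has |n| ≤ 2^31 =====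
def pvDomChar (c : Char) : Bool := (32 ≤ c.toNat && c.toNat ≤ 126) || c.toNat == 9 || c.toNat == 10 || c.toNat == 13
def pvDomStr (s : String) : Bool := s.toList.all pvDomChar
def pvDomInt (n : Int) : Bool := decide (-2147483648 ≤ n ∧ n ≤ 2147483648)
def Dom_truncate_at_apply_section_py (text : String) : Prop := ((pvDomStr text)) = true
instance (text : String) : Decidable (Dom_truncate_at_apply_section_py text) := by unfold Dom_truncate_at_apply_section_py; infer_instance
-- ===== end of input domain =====

-- B replaces A's five independent find() scans + min/tie-break fold by one left-to-right
-- scan trying the phrases in order at each position (alternative algorithm, same cost).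


-- ===== PORT A =====
def applyStopPhrases : List String :=
  ["Apply now", "Save job", "Apply for this job", "Submit application", "Apply for job"]

-- one iteration of A's `for phrase in _APPLY_STOP_PHRASES` loop (state = (best_start, best_end))
def aStep (tl : List Char) (st : Option Int × Option Int) (phrase : String) :
    Option Int × Option Int :=
  let idx := PySem.Chars.find tl (PySem.Chars.lower phrase.toList)
  if idx ≠ -1 then
    let e := idx + (phrase.toList.length : Int)
    match st.1 with
    | none => (some idx, some e)
    | some bs => if idx < bs then (some idx, some e) else st
  else st

def truncate_at_apply_section_py (text : String) : String :=
  if text.toList = [] ∨ PySem.Chars.strip text.toList = [] then text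
  else
    let tl := PySem.Chars.lower text.toList
    let st := applyStopPhrases.foldl (aStep tl) (none, none)
    match st.2 with
    | some e => PySem.Str.strip (PySem.Str.slice text none (some e))
    | none => text

-- ===== PORT B =====
def lowPhrases : List (List Char) :=
  applyStopPhrases.map (fun p => PySem.Chars.lower p.toList)

-- Source B's `for i in range(len(text_lower)): for p in phrases: …` as a walk over the suffixes
def scanStop (ps : List (List Char)) : List Char → Nat → Option Nat
  | [], _ => none
  | c :: rest, i =>
    match ps.find? (fun p => PySem.Chars.startswith (c :: rest) p) with
    | some p => some (i + p.length)
    | none => scanStop ps rest (i + 1)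

def truncate_at_apply_section_py_alt (text : String) : String :=
  if text.toList = [] ∨ PySem.Chars.strip text.toList = [] then text
  else
    match scanStop lowPhrases (PySem.Chars.lower text.toList) 0 with
    | some e => PySem.Str.strip (PySem.Str.slice text none (some (e : Int)))
    | none => text

-- ===== PRECONDITION & SPEC =====
def Spec_truncate_at_apply_section_py (text : String) (out : String) : Prop := out = truncate_at_apply_section_py_alt text
instance (text : String) (out : String) : Decidable (Spec_truncate_at_apply_section_py text out) := by unfold Spec_truncate_at_apply_section_py; infer_instance

-- ===== CLAIM (what is proved, stated in full; the proofs are below) =====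
def Claim_equal_truncate_at_apply_section_py : Prop := ∀ (text : String), Dom_truncate_at_apply_section_py text → Spec_truncate_at_apply_section_py text (truncate_at_apply_section_py text)

-- ===== LEMMAS AND PROOFS =====

-- the A-side step over an already-lowered phrase (what aStep computes, since lower is length-preserving)
def gStep (tl : List Char) (st : Option Int × Option Int) (p : List Char) :
    Option Int × Option Int :=
  let idx := PySem.Chars.find tl p
  if idx ≠ -1 then
    let e := idx + (p.length : Int)
    match st.1 with
    | none => (some idx, some e)
    | some bs => if idx < bs then (some idx, some e) else st
  else st

theorem aStep_eq_gStep (tl : List Char) (st : Option Int × Option Int) (phrase : String) :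
    aStep tl st phrase = gStep tl st (PySem.Chars.lower phrase.toList) := by
  simp [aStep, gStep, PySem.Chars.lower]

-- find points at the first occurrence: uniqueness
theorem find_unique (cs p : List Char) (j : ℕ) (hj : p <+: cs.drop j)
    (hmin : ∀ i < j, ¬ p <+: cs.drop i) : PySem.Chars.find cs p = (j : Int) := by
  have hin : PySem.Chars.isIn p cs = true :=
    (PySem.Chars.exists_prefix_drop_iff_isIn p cs).1 ⟨j, hj⟩
  have hne : PySem.Chars.find cs p ≠ -1 :=
    (PySem.Chars.find_ne_neg_one_iff cs p).2 ((PySem.Chars.isIn_iff_infix p cs).1 hin)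
  have hge : 0 ≤ PySem.Chars.find cs p := by
    have := PySem.Chars.neg_one_le_find cs p; omega
  obtain ⟨hpre, hm⟩ := PySem.Chars.find_spec hge
  have hkj : (PySem.Chars.find cs p).toNat = j := by
    by_contra hne'
    rcases Nat.lt_or_ge (PySem.Chars.find cs p).toNat j with h | h
    · exact hmin _ h hpre
    · exact hm j (by omega) hj
  omega

theorem find_zero_of_prefix (cs p : List Char) (h : p <+: cs) :
    PySem.Chars.find cs p = 0 := by
  have := find_unique cs p 0 (by simpa using h) (by omega)
  simpa using this

theorem find_ne_zero_of_not_prefix (cs p : List Char) (h : ¬ p <+: cs) :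
    PySem.Chars.find cs p ≠ 0 := by
  intro h0
  have hge : (0 : Int) ≤ PySem.Chars.find cs p := by omega
  obtain ⟨hpre, _⟩ := PySem.Chars.find_spec hge
  rw [h0] at hpre
  exact h (by simpa using hpre)

theorem find_cons (c : Char) (cs p : List Char) (_hp : p ≠ [])
    (hns : ¬ p <+: (c :: cs)) :
    PySem.Chars.find (c :: cs) p =
      if PySem.Chars.find cs p = -1 then -1 else PySem.Chars.find cs p + 1 := by
  by_cases hm : PySem.Chars.find cs p = -1
  · rw [if_pos hm, PySem.Chars.find_eq_neg_one_iff]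
    intro hinf
    rcases List.infix_cons_iff.1 hinf with h | h
    · exact hns h
    · exact (PySem.Chars.find_eq_neg_one_iff cs p).1 hm h
  · have hge : 0 ≤ PySem.Chars.find cs p := by
      have := PySem.Chars.neg_one_le_find cs p; omega
    obtain ⟨hpre, hmin⟩ := PySem.Chars.find_spec hge
    rw [if_neg hm]
    have heq := find_unique (c :: cs) p ((PySem.Chars.find cs p).toNat + 1) ?_ ?_
    · rw [heq]; omega
    · simpa using hpre
    · intro i hi
      cases i with
      | zero => simpa using hns
      | succ i' =>
        intro hpp
        exact hmin i' (by omega) (by simpa using hpp)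

theorem scan_shift (ps : List (List Char)) (cs : List Char) (i : ℕ) :
    scanStop ps cs i = (scanStop ps cs 0).map (i + ·) := by
  induction cs generalizing i with
  | nil => simp [scanStop]
  | cons c rest ih =>
    simp only [scanStop]
    cases h : ps.find? (fun p => PySem.Chars.startswith (c :: rest) p) with
    | some p => simp
    | none =>
      simp only [ih (i+1), ih 1, Option.map_map]
      cases scanStop ps rest 0 with
      | none => rfl
      | some e => simp; try omega

theorem fold_keep_zero (cs : List Char) (e : Int) :
    ∀ P : List (List Char), List.foldl (gStep cs) (some 0, some e) P = (some 0, some e) := by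
  intro P
  induction P with
  | nil => rfl
  | cons p P ih =>
    have h1 := PySem.Chars.neg_one_le_find cs p
    rw [List.foldl_cons]
    by_cases h2 : PySem.Chars.find cs p = -1
    · rw [show gStep cs (some 0, some e) p = (some 0, some e) from by simp [gStep, h2]]
      exact ih
    · rw [show gStep cs (some 0, some e) p = (some 0, some e) from by
        simp [gStep, h2, show ¬ PySem.Chars.find cs p < 0 by omega]]
      exact ih

def stInv (st : Option Int × Option Int) : Prop :=
  st.1 = none ∨ ∃ bs, st.1 = some bs ∧ 1 ≤ bs

theorem fold_match (cs : List Char) :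
    ∀ (P : List (List Char)) (st : Option Int × Option Int) (q : List Char),
      stInv st →
      P.find? (fun p => decide (p <+: cs)) = some q →
      (List.foldl (gStep cs) st P).2 = some ((q.length : Int)) := by
  intro P
  induction P with
  | nil => intro st q _ h; simp at h
  | cons p P ih =>
    rintro ⟨st1, st2⟩ q hinv hfind
    by_cases hpre : p <+: cs
    · have hq : q = p := by
        rw [List.find?_cons_of_pos (by simpa using hpre)] at hfind
        exact (Option.some_inj.1 hfind).symm
      subst hq
      have h0 := find_zero_of_prefix cs q hpre
      simp only [stInv] at hinv
      have hstep : gStep cs (st1, st2) q = (some 0, some ((q.length : Int))) := by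
        rcases hinv with h | ⟨bs, hbs, hbs1⟩
        · subst h; simp [gStep, h0]
        · subst hbs; simp [gStep, h0, show (0:Int) < bs by omega]
      rw [List.foldl_cons, hstep, fold_keep_zero]
    · have hfind' : P.find? (fun p => decide (p <+: cs)) = some q := by
        rwa [List.find?_cons_of_neg (by simpa using hpre)] at hfind
      have hnz := find_ne_zero_of_not_prefix cs p hpre
      have hm1 := PySem.Chars.neg_one_le_find cs p
      rw [List.foldl_cons]
      apply ih _ q _ hfind'
      simp only [stInv] at hinv ⊢
      by_cases hmm : PySem.Chars.find cs p = -1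
      · simpa [gStep, hmm] using hinv
      · have hge1 : 1 ≤ PySem.Chars.find cs p := by omega
        rcases hinv with h | ⟨bs, hbs, hbs1⟩
        · subst h
          simp [gStep, hmm]
          omega
        · subst hbs
          by_cases hlt : PySem.Chars.find cs p < bs
          · simp [gStep, hmm, hlt]
            omega
          · simp [gStep, hmm, hlt]
            omega

def mapSt (st : Option Int × Option Int) : Option Int × Option Int :=
  (st.1.map (· + 1), st.2.map (· + 1))

theorem fold_shift (c : Char) (cs : List Char) :
    ∀ (P : List (List Char)) (st : Option Int × Option Int),
      (∀ p ∈ P, p ≠ [] ∧ ¬ p <+: (c :: cs)) →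
      List.foldl (gStep (c :: cs)) (mapSt st) P = mapSt (List.foldl (gStep cs) st P) := by
  intro P
  induction P with
  | nil => intro st _; rfl
  | cons p P ih =>
    rintro ⟨st1, st2⟩ hP
    obtain ⟨hne, hns⟩ := hP p (by simp)
    have hc := find_cons c cs p hne hns
    have hstep : gStep (c :: cs) (mapSt (st1, st2)) p = mapSt (gStep cs (st1, st2) p) := by
      by_cases hm : PySem.Chars.find cs p = -1
      · simp [gStep, hc, hm]
      · have hge : 0 ≤ PySem.Chars.find cs p := by
          have := PySem.Chars.neg_one_le_find cs p; omega
        have h1 : PySem.Chars.find cs p + 1 ≠ -1 := by omega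
        cases st1 with
        | none =>
          simp [gStep, hc, hm, h1, mapSt]
          omega
        | some bs =>
          by_cases hlt : PySem.Chars.find cs p < bs
          · simp [gStep, hc, hm, h1, mapSt, hlt,
              show PySem.Chars.find cs p + 1 < bs + 1 by omega]
            omega
          · simp [gStep, hc, hm, h1, mapSt, hlt,
              show ¬ PySem.Chars.find cs p + 1 < bs + 1 by omega]
    rw [List.foldl_cons, List.foldl_cons, hstep, ih _ (fun q hq => hP q (by simp [hq]))]

theorem fold_none (cs : List Char) :
    ∀ P : List (List Char), (∀ p ∈ P, PySem.Chars.find cs p = -1) →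
      List.foldl (gStep cs) (none, none) P = (none, none) := by
  intro P
  induction P with
  | nil => intro _; rfl
  | cons p P ih =>
    intro h
    rw [List.foldl_cons]
    have hstep : gStep cs (none, none) p = (none, none) := by
      simp [gStep, h p (by simp)]
    rw [hstep]; exact ih (fun q hq => h q (by simp [hq]))

theorem main_lemma (P : List (List Char)) (hne : ∀ p ∈ P, p ≠ []) :
    ∀ cs : List Char,
      (List.foldl (gStep cs) (none, none) P).2 =
        (scanStop P cs 0).map (fun e => (e : Int)) := by
  intro cs
  induction cs with
  | nil =>
    rw [fold_none [] P ?_]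
    · simp [scanStop]
    · intro p hp
      rw [PySem.Chars.find_eq_neg_one_iff]
      intro hinf
      exact hne p hp (List.infix_nil.1 hinf)
  | cons c rest ih =>
    have hfuns : (fun p => PySem.Chars.startswith (c :: rest) p) =
        (fun p => decide (p <+: (c :: rest))) := by
      funext p
      rcases h : PySem.Chars.startswith (c :: rest) p with _ | _
      · have hnp : ¬ p <+: (c :: rest) := fun hp => by
          rw [(PySem.Chars.startswith_iff _ _).2 hp] at h; exact Bool.noConfusion h
        simp [hnp]
      · simp [(PySem.Chars.startswith_iff _ _).1 h]
    by_cases hex : ∃ p ∈ P, p <+: (c :: rest)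
    · obtain ⟨q, hq⟩ : ∃ q, P.find? (fun p => decide (p <+: (c :: rest))) = some q := by
        have := (List.find?_isSome (xs := P) (p := fun p => decide (p <+: (c :: rest)))).2
          (by obtain ⟨p, hp, hp2⟩ := hex; exact ⟨p, hp, by simpa using hp2⟩)
        exact Option.isSome_iff_exists.1 this
      rw [fold_match (c :: rest) P (none, none) q (Or.inl rfl) hq]
      simp only [scanStop, hfuns, hq]
      simp
    · have hex : ∀ p ∈ P, ¬ p <+: (c :: rest) := fun p hp hpre => hex ⟨p, hp, hpre⟩
      have hP : ∀ p ∈ P, p ≠ [] ∧ ¬ p <+: (c :: rest) := fun p hp => ⟨hne p hp, hex p hp⟩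
      have hfn : P.find? (fun p => decide (p <+: (c :: rest))) = none := by
        rw [List.find?_eq_none]
        intro p hp; simpa using hex p hp
      have hsh := fold_shift c rest P (none, none) hP
      rw [show ((none, none) : Option Int × Option Int) = mapSt (none, none) from rfl, hsh]
      simp only [scanStop, hfuns, hfn]
      rw [scan_shift P rest 1]
      cases hsr : scanStop P rest 0 with
      | none =>
        rw [hsr] at ih
        simp [mapSt, ih]
      | some e =>
        rw [hsr] at ih
        simp [mapSt, ih]
        omega

-- ===== VERDICT (by name: the statement is the Claim_ definition above) =====
theorem truncate_at_apply_section_py_spec : Claim_equal_truncate_at_apply_section_py := by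
  intro text _
  unfold Spec_truncate_at_apply_section_py
  simp only [truncate_at_apply_section_py, truncate_at_apply_section_py_alt]
  split_ifs with h
  · rfl
  · have hfold : applyStopPhrases.foldl (aStep (PySem.Chars.lower text.toList)) (none, none) =
        List.foldl (gStep (PySem.Chars.lower text.toList)) (none, none) lowPhrases := by
      rw [lowPhrases, List.foldl_map]
      congr 1
      funext st phrase
      exact aStep_eq_gStep _ st phrase
    have hne : ∀ p ∈ lowPhrases, p ≠ [] := by decide
    have hmain := main_lemma lowPhrases hne (PySem.Chars.lower text.toList)
    rw [hfold]
    cases hs : scanStop lowPhrases (PySem.Chars.lower text.toList) 0 with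
    | none =>
      rw [show (List.foldl (gStep (PySem.Chars.lower text.toList)) (none, none) lowPhrases).2
            = none from by rw [hmain, hs]; rfl]
    | some e =>
      rw [show (List.foldl (gStep (PySem.Chars.lower text.toList)) (none, none) lowPhrases).2
            = some (e : Int) from by rw [hmain, hs]; rfl]
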